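-- pv_equiv track=rewrite | github.com/abiugu/PROJETOS | PROJETO PADROES BLAZE/contador numeros consecutivos.py | contar_sequencias
-- ===== SOURCE A (Python) =====
-- def contar_sequencias(nums):
--     count_numeros = {i: 0 for i in range(15)}
--     count_sequencias_vistas = {f"{i},{j}": 0 for i in range(15) for j in range(15)}
--     max_sequencias_consecutivas = {f"{i},{j}": 0 for i in range(15) for j in range(15)}
--     contador_ativos = {f"{i},{j}": 0 for i in range(15) for j in range(15)}
--
--     # Contagem dos números individuais
--     for num in nums:
--         if num in count_numeros:
--             count_numeros[num] += 1
--
--     # Contagem de sequências e máximas consecutivas com a lógica correta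
--     for i in range(len(nums) - 1):
--         atual_i = nums[i]
--         atual_j = nums[i+1]
--         chave = f"{atual_i},{atual_j}"
--
--         # Contagem de aparições totais
--         count_sequencias_vistas[chave] += 1
--
--         # Incrementa o contador para a sequência atual
--         contador_ativos[chave] += 1
--         if contador_ativos[chave] > max_sequencias_consecutivas[chave]:
--             max_sequencias_consecutivas[chave] = contador_ativos[chave]
--
--         # Zera contadores de outras sequências que começam com o mesmo i e j ≠ atual_j
--         for k in range(15):
--             if k != atual_j:
--                 outra_chave = f"{atual_i},{k}"
--                 contador_ativos[outra_chave] = 0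
--
--     # Gerar resultado formatado
--     resultado = []
--     resultado.append("----- Contagem de Números -----\n")
--     for num in range(15):
--         resultado.append(f"Numero {num}: {count_numeros[num]} vez(es)\n")
--
--     resultado.append("\n----- Contagem de Sequências (0,0 até 14,14) -----\n")
--     for i in range(15):
--         for j in range(15):
--             chave = f"{i},{j}"
--             vistas = count_sequencias_vistas[chave]
--             max_consec = max_sequencias_consecutivas[chave]
--             if vistas > 0 or max_consec > 0:
--                 resultado.append(f"\nSequência {chave}:")
--                 if vistas > 0:
--                     resultado.append(f"  - Total de vezes vista: {vistas}")
--                 if max_consec > 0: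
--                     resultado.append(f"  - Maior sequência consecutiva: {max_consec}")
--
--     return resultado
-- ===== SOURCE B (Python) =====
-- def contar_sequencias(nums):
--     # counts of single numbers 0..14, as a flat list
--     count = [0] * 15
--     for num in nums:
--         if 0 <= num < 15:
--             count[num] += 1
--
--     # pair statistics keyed by (i, j) tuples; run tracking per starting value
--     vistas = {}
--     max_run = {}
--     cur_succ = {}
--     cur_run = {}
--     for a, b in zip(nums, nums[1:]):
--         vistas[(a, b)] = vistas.get((a, b), 0) + 1
--         if cur_succ.get(a) == b:
--             cur_run[a] += 1
--         else:
--             cur_succ[a] = b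
--             cur_run[a] = 1
--         if cur_run[a] > max_run.get((a, b), 0):
--             max_run[(a, b)] = cur_run[a]
--
--     resultado = ["----- Contagem de Números -----\n"]
--     for num in range(15):
--         resultado.append(f"Numero {num}: {count[num]} vez(es)\n")
--
--     resultado.append("\n----- Contagem de Sequências (0,0 até 14,14) -----\n")
--     for i in range(15):
--         for j in range(15):
--             v = vistas.get((i, j), 0)
--             m = max_run.get((i, j), 0)
--             if v > 0 or m > 0:
--                 resultado.append(f"\nSequência {i},{j}:")
--                 if v > 0:
--                     resultado.append(f"  - Total de vezes vista: {v}")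
--                 if m > 0:
--                     resultado.append(f"  - Maior sequência consecutiva: {m}")
--     return resultado
-- ===== Notes on version B (the rewrite author's own statement) =====
-- stated objective: faster
-- what changed: B drops A's four preallocated 225/15-entry dicts with string keys and the 15-iteration reset loop per adjacent pair; instead it tracks one current successor and run length per starting value in small tuple/int-keyed dicts filled on demand, and pairs come from zip instead of index arithmetic.
import Mathlib
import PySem

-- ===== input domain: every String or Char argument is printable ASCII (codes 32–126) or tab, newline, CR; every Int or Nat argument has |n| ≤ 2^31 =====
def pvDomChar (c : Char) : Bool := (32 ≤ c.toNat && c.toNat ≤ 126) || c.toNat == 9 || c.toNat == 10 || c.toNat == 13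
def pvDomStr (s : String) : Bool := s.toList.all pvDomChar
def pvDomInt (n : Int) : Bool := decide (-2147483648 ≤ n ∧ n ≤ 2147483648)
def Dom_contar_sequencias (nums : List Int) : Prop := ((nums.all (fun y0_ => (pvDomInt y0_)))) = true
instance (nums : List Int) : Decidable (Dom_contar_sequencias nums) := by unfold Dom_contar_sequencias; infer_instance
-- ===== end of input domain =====

-- B replaces A's four preallocated string-keyed dicts and its 15-iteration reset loop per adjacent
-- pair by on-demand tuple/int-keyed dicts tracking one current successor/run per starting value
-- (less work per pair, a constant-factor change); return values agree wherever A returns.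

-- ===== PORT A =====
-- f"{i},{j}"
def pvKey (a b : Int) : String :=
  String.ofList (PySem.Int.toChars a ++ ',' :: PySem.Int.toChars b)
-- f"Numero {num}: {c} vez(es)\n"
def pvLineNum (num c : Int) : String :=
  String.ofList ("Numero ".toList ++ PySem.Int.toChars num ++ ": ".toList ++ PySem.Int.toChars c ++ " vez(es)\n".toList)
-- f"\nSequência {chave}:"
def pvLineSeqHdr (chave : String) : String :=
  String.ofList ("\nSequência ".toList ++ chave.toList ++ ":".toList)
-- f"  - Total de vezes vista: {v}"
def pvLineVistas (v : Int) : String :=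
  String.ofList ("  - Total de vezes vista: ".toList ++ PySem.Int.toChars v)
-- f"  - Maior sequência consecutiva: {m}"
def pvLineMax (m : Int) : String :=
  String.ofList ("  - Maior sequência consecutiva: ".toList ++ PySem.Int.toChars m)

-- {f"{i},{j}": 0 for i in range(15) for j in range(15)}
def pvInit225 : PySem.Dict String Int :=
  (PySem.List.pyRange 0 15 1).foldl
    (fun d i => (PySem.List.pyRange 0 15 1).foldl (fun d j => d.insert (pvKey i j) 0) d)
    PySem.Dict.empty

-- the shared result-formatting loops (identical in A and B up to how values are looked up)
def pvResultado (cnt : Int → Int) (vis mx : Int → Int → Int) : List String :=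
  let r := ["----- Contagem de Números -----\n"]
  let r := (PySem.List.pyRange 0 15 1).foldl (fun r num => r ++ [pvLineNum num (cnt num)]) r
  let r := r ++ ["\n----- Contagem de Sequências (0,0 até 14,14) -----\n"]
  (PySem.List.pyRange 0 15 1).foldl (fun r i =>
    (PySem.List.pyRange 0 15 1).foldl (fun r j =>
      let v := vis i j
      let m := mx i j
      if v > 0 ∨ m > 0 then
        let r := r ++ [pvLineSeqHdr (pvKey i j)]
        let r := if v > 0 then r ++ [pvLineVistas v] else r
        if m > 0 then r ++ [pvLineMax m] else r
      else r) r) r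

-- one iteration of A's pair loop on the state (vistas, max_consecutivas, contador_ativos)
def pvStepA (st : PySem.Dict String Int × PySem.Dict String Int × PySem.Dict String Int)
    (p : Int × Int) : PySem.Dict String Int × PySem.Dict String Int × PySem.Dict String Int :=
  let chave := pvKey p.1 p.2
  let vistas := st.1.modify chave 0 (· + 1)
  let ca := st.2.2.modify chave 0 (· + 1)
  let msc := if ca.getD chave 0 > st.2.1.getD chave 0 then st.2.1.insert chave (ca.getD chave 0) else st.2.1
  let ca := (PySem.List.pyRange 0 15 1).foldl
    (fun ca k => if k ≠ p.2 then ca.insert (pvKey p.1 k) 0 else ca) ca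
  (vistas, msc, ca)

def contar_sequencias (nums : List Int) : List String :=
  let count_numeros : PySem.Dict Int Int :=
    (PySem.List.pyRange 0 15 1).foldl (fun d i => d.insert i 0) PySem.Dict.empty
  let count_sequencias_vistas := pvInit225
  let max_sequencias_consecutivas := pvInit225
  let contador_ativos := pvInit225
  let count_numeros := nums.foldl
    (fun d num => if d.contains num then d.modify num 0 (· + 1) else d) count_numeros
  let st := (PySem.List.pyRange 0 ((nums.length : Int) - 1) 1).foldl
    (fun st i => pvStepA st (PySem.List.pyGetD nums i 0, PySem.List.pyGetD nums (i + 1) 0))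
    (count_sequencias_vistas, max_sequencias_consecutivas, contador_ativos)
  pvResultado (fun num => count_numeros.getD num 0)
    (fun i j => st.1.getD (pvKey i j) 0) (fun i j => st.2.1.getD (pvKey i j) 0)

-- ===== PORT B =====
-- one iteration of B's pair loop on the state (vistas, max_run, cur_succ, cur_run)
def pvStepB (st : PySem.Dict (Int × Int) Int × PySem.Dict (Int × Int) Int × PySem.Dict Int Int × PySem.Dict Int Int)
    (p : Int × Int) : PySem.Dict (Int × Int) Int × PySem.Dict (Int × Int) Int × PySem.Dict Int Int × PySem.Dict Int Int :=
  let vist := st.1.insert p (st.1.getD p 0 + 1)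
  let sr := if st.2.2.1.get? p.1 = some p.2
            then (st.2.2.1, st.2.2.2.modify p.1 0 (· + 1))
            else (st.2.2.1.insert p.1 p.2, st.2.2.2.insert p.1 1)
  let mr := if sr.2.getD p.1 0 > st.2.1.getD p 0 then st.2.1.insert p (sr.2.getD p.1 0) else st.2.1
  (vist, mr, sr.1, sr.2)

def contar_sequencias_alt (nums : List Int) : List String :=
  let count := nums.foldl
    (fun c num => if 0 ≤ num ∧ num < 15 then PySem.List.pySetD c num (PySem.List.pyGetD c num 0 + 1) else c)
    (List.replicate 15 (0 : Int))
  let st := (nums.zip (PySem.List.slice nums (some 1))).foldl pvStepB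
    (PySem.Dict.empty, PySem.Dict.empty, PySem.Dict.empty, PySem.Dict.empty)
  pvResultado (fun num => PySem.List.pyGetD count num 0)
    (fun i j => st.1.getD (i, j) 0) (fun i j => st.2.1.getD (i, j) 0)

-- ===== PRECONDITION & SPEC =====
-- Pre_ excludes exactly the inputs where A raises KeyError: lists of length ≥ 2 containing a
-- value outside 0..14 (every element then occurs in some adjacent pair, whose key is absent).
def Pre_contar_sequencias (nums : List Int) : Prop :=
  nums.length ≤ 1 ∨ ∀ x ∈ nums, 0 ≤ x ∧ x < 15
instance (nums : List Int) : Decidable (Pre_contar_sequencias nums) := by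
  unfold Pre_contar_sequencias; infer_instance
def pvWitness_contar_sequencias : List Int := [1, 2, 2, 2, 3]
def Spec_contar_sequencias (nums : List Int) (out : List String) : Prop := out = contar_sequencias_alt nums
instance (nums : List Int) (out : List String) : Decidable (Spec_contar_sequencias nums out) := by
  unfold Spec_contar_sequencias; infer_instance

-- ===== CLAIM (what is proved, stated in full; the proofs are below) =====
def Claim_equal_contar_sequencias : Prop := ∀ (nums : List Int), Dom_contar_sequencias nums → Pre_contar_sequencias nums → Spec_contar_sequencias nums (contar_sequencias nums)

-- ===== LEMMAS AND PROOFS =====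

-- key strings are distinct for distinct in-range pairs
set_option maxHeartbeats 2000000 in
theorem pvKey_inj_mem : ∀ i ∈ PySem.List.pyRange 0 15 1, ∀ j ∈ PySem.List.pyRange 0 15 1,
    ∀ a ∈ PySem.List.pyRange 0 15 1, ∀ b ∈ PySem.List.pyRange 0 15 1,
    pvKey i j = pvKey a b → i = a ∧ j = b := by decide

theorem pvKey_inj {i j a b : Int} (hi0 : 0 ≤ i) (hi : i < 15) (hj0 : 0 ≤ j) (hj : j < 15)
    (ha0 : 0 ≤ a) (ha : a < 15) (hb0 : 0 ≤ b) (hb : b < 15) :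
    pvKey i j = pvKey a b ↔ i = a ∧ j = b := by
  constructor
  · intro h
    exact pvKey_inj_mem i (PySem.List.mem_pyRange_one.2 ⟨hi0, hi⟩) j (PySem.List.mem_pyRange_one.2 ⟨hj0, hj⟩)
      a (PySem.List.mem_pyRange_one.2 ⟨ha0, ha⟩) b (PySem.List.mem_pyRange_one.2 ⟨hb0, hb⟩) h
  · rintro ⟨rfl, rfl⟩; rfl

-- a fold that only inserts value 0 keeps a zero lookup zero
theorem pv_getD_zero_foldl {κ α : Type} [BEq κ] [LawfulBEq κ] (l : List α)
    (F : PySem.Dict κ Int → α → PySem.Dict κ Int) (q : κ)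
    (hF : ∀ d x, d.getD q 0 = 0 → (F d x).getD q 0 = 0) :
    ∀ d : PySem.Dict κ Int, d.getD q 0 = 0 → (l.foldl F d).getD q 0 = 0 := by
  induction l with
  | nil => intro d hd; simpa using hd
  | cons x xs ih => intro d hd; exact ih (F d x) (hF d x hd)

theorem pvInit225_getD (q : String) : pvInit225.getD q 0 = 0 := by
  unfold pvInit225
  refine pv_getD_zero_foldl _ _ q ?_ _ (by simp)
  intro d i hd
  refine pv_getD_zero_foldl _ _ q ?_ d hd
  intro d j hd
  rw [PySem.Dict.getD_insert]
  split_ifs with h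
  · rfl
  · exact hd

-- the reset loop zeroes exactly the keys "a,k" with k ≠ b
theorem pvReset_getD (b : Int) : ∀ (ks : List Int) (d : PySem.Dict String Int) (a : Int) (s : String),
    ((ks.foldl (fun ca k => if k ≠ b then ca.insert (pvKey a k) 0 else ca) d).getD s 0)
    = if ∃ k ∈ ks, k ≠ b ∧ s = pvKey a k then 0 else d.getD s 0 := by
  intro ks
  induction ks with
  | nil => intro d a s; simp
  | cons x ks ih =>
    intro d a s
    rw [List.foldl_cons, ih]
    by_cases hxb : x = b
    · subst hxb
      have hiff : (∃ k ∈ x :: ks, k ≠ x ∧ s = pvKey a k) ↔ (∃ k ∈ ks, k ≠ x ∧ s = pvKey a k) := by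
        constructor
        · rintro ⟨k, hk, h1, h2⟩
          rcases List.mem_cons.1 hk with rfl | hk
          · exact absurd rfl h1
          · exact ⟨k, hk, h1, h2⟩
        · rintro ⟨k, hk, h1, h2⟩
          exact ⟨k, List.mem_cons_of_mem _ hk, h1, h2⟩
      simp only [ne_eq, not_true_eq_false, if_false]
      exact if_congr hiff.symm rfl rfl
    · simp only [ne_eq, hxb, not_false_eq_true, if_true]
      by_cases hr : ∃ k ∈ ks, k ≠ b ∧ s = pvKey a k
      · have hr' : ∃ k ∈ x :: ks, k ≠ b ∧ s = pvKey a k := by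
          obtain ⟨k, hk, h1, h2⟩ := hr; exact ⟨k, List.mem_cons_of_mem _ hk, h1, h2⟩
        rw [if_pos hr, if_pos hr']
      · rw [if_neg hr, PySem.Dict.getD_insert]
        by_cases hs : s = pvKey a x
        · have hr' : ∃ k ∈ x :: ks, k ≠ b ∧ s = pvKey a k :=
            ⟨x, List.mem_cons_self, hxb, hs⟩
          rw [if_pos hs, if_pos hr']
        · have hr' : ¬ ∃ k ∈ x :: ks, k ≠ b ∧ s = pvKey a k := by
            rintro ⟨k, hk, h1, h2⟩
            rcases List.mem_cons.1 hk with rfl | hk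
            · exact hs h2
            · exact hr ⟨k, hk, h1, h2⟩
          rw [if_neg hs, if_neg hr']

theorem pv_pyGetD_set_self (c : List Int) (m v : Int) (h0 : 0 ≤ m) (h1 : m < (c.length : Int)) :
    PySem.List.pyGetD (c.set m.toNat v) m 0 = v := by
  rw [PySem.List.pyGetD_eq_getElem _ 0 h0 (by simpa using h1)]
  rw [List.getElem_set, if_pos rfl]

theorem pv_pyGetD_set_ne (c : List Int) (x m v : Int) (h0 : 0 ≤ m) (h1 : m < (c.length : Int))
    (h2 : 0 ≤ x) (hmx : m ≠ x) :
    PySem.List.pyGetD (c.set x.toNat v) m 0 = PySem.List.pyGetD c m 0 := by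
  rw [PySem.List.pyGetD_eq_getElem _ 0 h0 (by simpa using h1), PySem.List.pyGetD_eq_getElem _ 0 h0 h1]
  rw [List.getElem_set, if_neg (by omega)]

-- counting part: A's guarded dict loop equals B's guarded list loop, pointwise on 0..14
theorem pvCount_loop (nums : List Int) :
    ∀ (d : PySem.Dict Int Int) (c : List Int), c.length = 15 →
    (∀ k : Int, d.contains k = decide (0 ≤ k ∧ k < 15)) →
    (∀ n : Int, 0 ≤ n → n < 15 → d.getD n 0 = PySem.List.pyGetD c n 0) →
    ∀ n : Int, 0 ≤ n → n < 15 →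
    (nums.foldl (fun d num => if d.contains num then d.modify num 0 (· + 1) else d) d).getD n 0
    = PySem.List.pyGetD (nums.foldl
        (fun c num => if 0 ≤ num ∧ num < 15 then PySem.List.pySetD c num (PySem.List.pyGetD c num 0 + 1) else c) c) n 0 := by
  induction nums with
  | nil => intro d c _ _ hgd n h0 h1; exact hgd n h0 h1
  | cons x xs ih =>
    intro d c hlen hcont hgd n h0 h1
    rw [List.foldl_cons, List.foldl_cons]
    by_cases hx : 0 ≤ x ∧ x < 15
    · have hcx : d.contains x = true := by rw [hcont]; exact decide_eq_true hx
      rw [hcx, if_pos hx]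
      simp only [if_true]
      have hxt : ((x.toNat : Int)) = x := Int.toNat_of_nonneg hx.1
      have hxlt : x.toNat < c.length := by omega
      have hset : PySem.List.pySetD c x (PySem.List.pyGetD c x 0 + 1)
          = c.set x.toNat (PySem.List.pyGetD c x 0 + 1) := by
        unfold PySem.List.pySetD
        rw [← hxt, PySem.List.pySet?_natCast _ _ _ hxlt]
        rfl
      refine ih (d.modify x 0 (· + 1)) _ ?_ ?_ ?_ n h0 h1
      · rw [hset]; simpa using hlen
      · intro k
        rw [PySem.Dict.contains_modify, hcont]
        by_cases hk : k = x
        · subst hk; simp [hx]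
        · simp [hk]
      · intro m hm0 hm1
        rw [PySem.Dict.getD_modify, hset]
        by_cases hmx : m = x
        · subst hmx
          rw [if_pos rfl, hgd m hm0 hm1, pv_pyGetD_set_self c m _ hm0 (by omega)]
        · rw [if_neg hmx, hgd m hm0 hm1,
            pv_pyGetD_set_ne c x m _ hm0 (by omega) hx.1 hmx]
    · have hcx : d.contains x = false := by rw [hcont]; exact decide_eq_false hx
      rw [hcx, if_neg hx]
      simp only [Bool.false_eq_true, if_false]
      exact ih d c hlen hcont hgd n h0 h1

-- the index-driven pair enumeration of A is B's zip
theorem pvPairs_eq (nums : List Int) :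
    (PySem.List.pyRange 0 ((nums.length : Int) - 1) 1).map
      (fun i => (PySem.List.pyGetD nums i 0, PySem.List.pyGetD nums (i + 1) 0))
    = nums.zip (PySem.List.slice nums (some 1)) := by
  rw [PySem.List.slice_from nums (by norm_num : (0:Int) ≤ 1)]
  rw [PySem.List.pyRange_one]
  rw [List.map_map]
  apply List.ext_getElem
  · simp only [List.length_map, List.length_range, List.length_zip, List.length_drop]
    omega
  · intro k h1 h2
    have hk : k < nums.length - 1 := by
      simp only [List.length_map, List.length_range] at h1
      omega
    simp only [List.getElem_map, List.getElem_range, Function.comp_apply, List.getElem_zip,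
      List.getElem_drop]
    have e1 : (0 : Int) + (k : Int) = ((k : Nat) : Int) := by ring
    have e2 : (0 : Int) + (k : Int) + 1 = (((k + 1 : Nat)) : Int) := by push_cast; ring
    rw [Prod.mk.injEq]
    refine ⟨?_, ?_⟩
    · rw [e1, PySem.List.pyGetD_natCast]
      rw [List.getD_eq_getElem?_getD, List.getElem?_eq_getElem (by omega)]
      rfl
    · rw [e2, PySem.List.pyGetD_natCast]
      rw [List.getD_eq_getElem?_getD, List.getElem?_eq_getElem (by omega)]
      simp only [Option.getD_some]
      exact getElem_congr rfl (by omega) (by omega)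

-- the pair-loop invariant: A's three dicts vs B's four, pointwise on in-range keys
theorem pvPair_loop (ps : List (Int × Int))
    (hps : ∀ p ∈ ps, 0 ≤ p.1 ∧ p.1 < 15 ∧ 0 ≤ p.2 ∧ p.2 < 15) :
    ∀ (va msc ca : PySem.Dict String Int) (vb mb : PySem.Dict (Int × Int) Int) (cs cr : PySem.Dict Int Int),
    (∀ i j : Int, 0 ≤ i → i < 15 → 0 ≤ j → j < 15 → va.getD (pvKey i j) 0 = vb.getD (i, j) 0) →
    (∀ i j : Int, 0 ≤ i → i < 15 → 0 ≤ j → j < 15 → msc.getD (pvKey i j) 0 = mb.getD (i, j) 0) →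
    (∀ i j : Int, 0 ≤ i → i < 15 → 0 ≤ j → j < 15 →
      ca.getD (pvKey i j) 0 = (if cs.get? i = some j then cr.getD i 0 else 0)) →
    (∀ i j : Int, 0 ≤ i → i < 15 → 0 ≤ j → j < 15 →
      (ps.foldl pvStepA (va, msc, ca)).1.getD (pvKey i j) 0 = (ps.foldl pvStepB (vb, mb, cs, cr)).1.getD (i, j) 0)
    ∧ (∀ i j : Int, 0 ≤ i → i < 15 → 0 ≤ j → j < 15 →
      (ps.foldl pvStepA (va, msc, ca)).2.1.getD (pvKey i j) 0 = (ps.foldl pvStepB (vb, mb, cs, cr)).2.1.getD (i, j) 0) := by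
  revert hps
  induction ps with
  | nil =>
    intro _ va msc ca vb mb cs cr hv hm hca
    exact ⟨hv, hm⟩
  | cons p ps ih =>
    intro hps va msc ca vb mb cs cr hv hm hca
    obtain ⟨a, b⟩ := p
    obtain ⟨ha0, ha1, hb0, hb1⟩ := hps (a, b) List.mem_cons_self
    have hps' : ∀ q ∈ ps, 0 ≤ q.1 ∧ q.1 < 15 ∧ 0 ≤ q.2 ∧ q.2 < 15 :=
      fun q hq => hps q (List.mem_cons_of_mem _ hq)
    rw [List.foldl_cons, List.foldl_cons]
    simp only [pvStepA, pvStepB]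
    set K := pvKey a b with hK
    set sr := if cs.get? a = some b then (cs, cr.modify a 0 (· + 1)) else (cs.insert a b, cr.insert a 1) with hsr
    have hKne : ∀ i j : Int, 0 ≤ i → i < 15 → 0 ≤ j → j < 15 → ¬(i = a ∧ j = b) → pvKey i j ≠ K := by
      intro i j hi0 hi1 hj0 hj1 hij h
      exact hij ((pvKey_inj hi0 hi1 hj0 hj1 ha0 ha1 hb0 hb1).1 h)
    have hcam : (ca.modify K 0 (· + 1)).getD K 0 = ca.getD K 0 + 1 := by
      rw [PySem.Dict.getD_modify, if_pos rfl]
    have hsr1a : sr.1.get? a = some b := by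
      rw [hsr]
      by_cases h : cs.get? a = some b
      · rw [if_pos h]; exact h
      · rw [if_neg h]; exact (PySem.Dict.get?_insert cs a a b).trans (if_pos rfl)
    have hsr2a : sr.2.getD a 0 = ca.getD K 0 + 1 := by
      rw [hca a b ha0 ha1 hb0 hb1, hsr]
      by_cases h : cs.get? a = some b
      · rw [if_pos h, if_pos h]
        exact (PySem.Dict.getD_modify cr a a 0 (· + 1)).trans (if_pos rfl)
      · rw [if_neg h, if_neg h]
        exact (PySem.Dict.getD_insert cr a a 1 0).trans (if_pos rfl)
    have hsr1ne : ∀ i : Int, i ≠ a → sr.1.get? i = cs.get? i := by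
      intro i hia
      rw [hsr]
      by_cases h : cs.get? a = some b
      · rw [if_pos h]
      · rw [if_neg h]; exact (PySem.Dict.get?_insert cs a i b).trans (if_neg hia)
    have hsr2ne : ∀ i : Int, i ≠ a → sr.2.getD i 0 = cr.getD i 0 := by
      intro i hia
      rw [hsr]
      by_cases h : cs.get? a = some b
      · rw [if_pos h]; exact (PySem.Dict.getD_modify cr a i 0 (· + 1)).trans (if_neg hia)
      · rw [if_neg h]; exact (PySem.Dict.getD_insert cr a i 1 0).trans (if_neg hia)
    refine ih hps' _ _ _ _ _ _ _ ?_ ?_ ?_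
    · -- vistas
      intro i j hi0 hi1 hj0 hj1
      rw [PySem.Dict.getD_modify, PySem.Dict.getD_insert]
      by_cases hij : i = a ∧ j = b
      · obtain ⟨rfl, rfl⟩ := hij
        rw [if_pos rfl, if_pos rfl, hv i j hi0 hi1 hj0 hj1]
      · rw [if_neg (hKne i j hi0 hi1 hj0 hj1 hij),
          if_neg (by simpa [Prod.mk.injEq] using hij), hv i j hi0 hi1 hj0 hj1]
    · -- max consecutivas
      intro i j hi0 hi1 hj0 hj1
      rw [hcam, hsr2a, hm a b ha0 ha1 hb0 hb1]
      by_cases hc : ca.getD K 0 + 1 > mb.getD (a, b) 0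
      · rw [if_pos hc, if_pos hc, PySem.Dict.getD_insert, PySem.Dict.getD_insert]
        by_cases hij : i = a ∧ j = b
        · obtain ⟨rfl, rfl⟩ := hij
          rw [if_pos rfl, if_pos rfl]
        · rw [if_neg (hKne i j hi0 hi1 hj0 hj1 hij),
            if_neg (by simpa [Prod.mk.injEq] using hij), hm i j hi0 hi1 hj0 hj1]
      · rw [if_neg hc, if_neg hc]
        exact hm i j hi0 hi1 hj0 hj1
    · -- contador ativos invariant
      intro i j hi0 hi1 hj0 hj1
      rw [pvReset_getD]
      have hcond : (∃ k ∈ PySem.List.pyRange 0 15 1, k ≠ b ∧ pvKey i j = pvKey a k) ↔ (i = a ∧ j ≠ b) := by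
        constructor
        · rintro ⟨k, hk, hkb, hs⟩
          obtain ⟨hk0, hk1⟩ := PySem.List.mem_pyRange_one.1 hk
          obtain ⟨hia, hjk⟩ := (pvKey_inj hi0 hi1 hj0 hj1 ha0 ha1 hk0 hk1).1 hs
          exact ⟨hia, hjk ▸ hkb⟩
        · rintro ⟨rfl, hjb⟩
          exact ⟨j, PySem.List.mem_pyRange_one.2 ⟨hj0, hj1⟩, hjb, rfl⟩
      rw [if_congr hcond rfl rfl]
      by_cases hia : i = a
      · subst hia
        by_cases hjb : j = b
        · subst hjb
          rw [if_neg (by simp), hcam, hsr1a, if_pos rfl, hsr2a]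
        · rw [if_pos ⟨rfl, hjb⟩, hsr1a, if_neg (by simpa using fun h => hjb h.symm)]
      · rw [if_neg (by simp [hia]), PySem.Dict.getD_modify,
          if_neg (hKne i j hi0 hi1 hj0 hj1 (by simp [hia])), hsr1ne i hia, hsr2ne i hia,
          hca i j hi0 hi1 hj0 hj1]

theorem pvResultado_congr (cnt cnt' : Int → Int) (vis vis' mx mx' : Int → Int → Int)
    (hc : ∀ n : Int, 0 ≤ n → n < 15 → cnt n = cnt' n)
    (hv : ∀ i j : Int, 0 ≤ i → i < 15 → 0 ≤ j → j < 15 → vis i j = vis' i j)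
    (hm : ∀ i j : Int, 0 ≤ i → i < 15 → 0 ≤ j → j < 15 → mx i j = mx' i j) :
    pvResultado cnt vis mx = pvResultado cnt' vis' mx' := by
  unfold pvResultado
  dsimp only
  have h1 : (PySem.List.pyRange 0 15 1).foldl
        (fun r num => r ++ [pvLineNum num (cnt num)]) ["----- Contagem de Números -----\n"]
      = (PySem.List.pyRange 0 15 1).foldl
        (fun r num => r ++ [pvLineNum num (cnt' num)]) ["----- Contagem de Números -----\n"] := by
    apply PySem.List.foldl_congr_mem
    intro acc x hx
    obtain ⟨h0, h1⟩ := PySem.List.mem_pyRange_one.1 hx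
    rw [hc x h0 h1]
  rw [h1]
  apply PySem.List.foldl_congr_mem
  intro acc i hi
  obtain ⟨hi0, hi1⟩ := PySem.List.mem_pyRange_one.1 hi
  apply PySem.List.foldl_congr_mem
  intro acc2 j hj
  obtain ⟨hj0, hj1⟩ := PySem.List.mem_pyRange_one.1 hj
  simp only [hv i j hi0 hi1 hj0 hj1, hm i j hi0 hi1 hj0 hj1]

-- the initial count dict of A contains exactly the keys 0..14
theorem pv_contains_insert0 : ∀ (l : List Int) (d : PySem.Dict Int Int) (k : Int),
    ((l.foldl (fun d i => d.insert i 0) d).contains k) = (decide (k ∈ l) || d.contains k) := by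
  intro l
  induction l with
  | nil => intro d k; simp
  | cons x xs ih =>
    intro d k
    rw [List.foldl_cons, ih, PySem.Dict.contains_insert]
    by_cases hk : k = x
    · simp [hk, List.mem_cons]
    · have hbx : (k == x) = false := beq_eq_false_iff_ne.mpr hk
      simp [hk, hbx, List.mem_cons]

-- ===== VERDICT (by name: the statement is the Claim_ definition above) =====
theorem contar_sequencias_spec : Claim_equal_contar_sequencias := by
  intro nums _hdom hpre
  unfold Spec_contar_sequencias contar_sequencias contar_sequencias_alt
  dsimp only
  have hzip := pvPairs_eq nums
  have hbounds : ∀ p ∈ nums.zip (PySem.List.slice nums (some 1)),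
      0 ≤ p.1 ∧ p.1 < 15 ∧ 0 ≤ p.2 ∧ p.2 < 15 := by
    rintro ⟨a, b⟩ hp
    rcases hpre with hlen | hall
    · exfalso
      have hnil : nums.zip (PySem.List.slice nums (some 1)) = [] := by
        apply List.eq_nil_of_length_eq_zero
        rw [List.length_zip, PySem.List.slice_from nums (by norm_num : (0:Int) ≤ 1),
          List.length_drop]
        omega
      rw [hnil] at hp
      exact List.not_mem_nil hp
    · obtain ⟨h1, h2⟩ := List.of_mem_zip hp
      rw [PySem.List.slice_from nums (by norm_num : (0:Int) ≤ 1)] at h2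
      have h2' := List.mem_of_mem_drop h2
      exact ⟨(hall a h1).1, (hall a h1).2, (hall b h2').1, (hall b h2').2⟩
  have hfold : (PySem.List.pyRange 0 ((nums.length : Int) - 1) 1).foldl
        (fun st i => pvStepA st (PySem.List.pyGetD nums i 0, PySem.List.pyGetD nums (i + 1) 0))
        (pvInit225, pvInit225, pvInit225)
      = (nums.zip (PySem.List.slice nums (some 1))).foldl pvStepA (pvInit225, pvInit225, pvInit225) := by
    rw [← hzip, List.foldl_map]
  obtain ⟨Hvis, Hmax⟩ := pvPair_loop (nums.zip (PySem.List.slice nums (some 1))) hbounds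
    pvInit225 pvInit225 pvInit225 PySem.Dict.empty PySem.Dict.empty PySem.Dict.empty PySem.Dict.empty
    (by intro i j _ _ _ _; rw [pvInit225_getD]; simp)
    (by intro i j _ _ _ _; rw [pvInit225_getD]; simp)
    (by intro i j _ _ _ _; rw [pvInit225_getD]; simp)
  apply pvResultado_congr
  · intro n h0 h1
    refine pvCount_loop nums _ _ (by simp) ?_ ?_ n h0 h1
    · intro k
      rw [pv_contains_insert0]
      simp [PySem.List.mem_pyRange_one]
    · intro m hm0 hm1
      have hz : ((PySem.List.pyRange 0 15 1).foldl (fun d i => d.insert i 0)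
          (PySem.Dict.empty : PySem.Dict Int Int)).getD m 0 = 0 := by
        refine pv_getD_zero_foldl _ _ m ?_ _ (by simp)
        intro d x hd
        rw [PySem.Dict.getD_insert]
        split_ifs
        · rfl
        · exact hd
      rw [hz, PySem.List.pyGetD_eq_getElem _ 0 hm0 (by simp; omega), List.getElem_replicate]
  · intro i j hi0 hi1 hj0 hj1
    rw [hfold]
    exact Hvis i j hi0 hi1 hj0 hj1
  · intro i j hi0 hi1 hj0 hj1
    rw [hfold]
    exact Hmax i j hi0 hi1 hj0 hj1
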